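-- pv_equiv track=rewrite | github.com/HugoMFFernandes/Exerc-cios_Pc_1 | Python/Exames/Exame_2024_B_v2.py | Transfoma_matriz_v2
-- ===== SOURCE A (Python) =====
-- def Transfoma_matriz_v2(A):
--
--     for i in range(len(A)):
--         max=A[i][0]
--         id_max=[0]
--         min=A[i][0]
--         id_min=[0]
--         for j in range(1,len(A[i])):
--             #Determinar os maximos e as suas posições
--             if A[i][j]>max:
--                 max=A[i][j]
--                 id_max=[j]
--
--             elif A[i][j]==max:
--                 id_max.append(j)
--
--             #Determinar os minimos e as suas posições
--             if A[i][j]<min: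
--                 min=A[i][j]
--                 id_min=[j]
--
--             elif A[i][j]==min:
--                 id_min.append(j)
--
--         #Trocar os elementos
--         for j in range(len(id_max)):
--             A[i][id_max[j]]=min
--
--         for j in range(len(id_min)):
--             A[i][id_min[j]]=max
--
--     return A
-- ===== SOURCE B (Python) =====
-- def Transfoma_matriz_v2(A):
--     for row in A:
--         mx = row[0]
--         mn = row[0]
--         for v in row[1:]:
--             if v > mx:
--                 mx = v
--             if v < mn:
--                 mn = v
--         for k in range(len(row)):
--             if row[k] == mx:
--                 row[k] = mn
--             elif row[k] == mn:
--                 row[k] = mx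
--     return A
-- ===== Notes on version B (the rewrite author's own statement) =====
-- stated objective: simpler
-- what changed: B drops A's id_max/id_min position-list bookkeeping and the two positional replacement loops: it scans each row once for the max and min values and then does a single value-based in-place pass (== max -> min, == min -> max).
import Mathlib
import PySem

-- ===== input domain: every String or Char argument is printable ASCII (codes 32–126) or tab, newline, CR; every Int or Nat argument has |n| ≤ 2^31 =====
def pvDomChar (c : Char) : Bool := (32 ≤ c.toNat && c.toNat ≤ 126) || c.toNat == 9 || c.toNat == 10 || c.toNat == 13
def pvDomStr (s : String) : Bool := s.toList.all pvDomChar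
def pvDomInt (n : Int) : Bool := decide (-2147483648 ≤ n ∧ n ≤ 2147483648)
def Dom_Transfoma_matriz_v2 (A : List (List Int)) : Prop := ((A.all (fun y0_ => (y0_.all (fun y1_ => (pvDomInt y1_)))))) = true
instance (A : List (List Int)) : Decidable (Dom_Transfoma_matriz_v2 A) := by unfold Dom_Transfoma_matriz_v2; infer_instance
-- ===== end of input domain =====

-- B replaces A's index-position lists (id_max/id_min) and two positional replacement
-- loops with a value-based single replacement pass per row (objective: simpler).
-- Both A and B mutate the argument rows in place in Python; the equivalence proved
-- here is about the return value.

-- ===== PORT A =====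
-- inner scan of A: for j in range(1, len(row)) tracking (max, id_max, min, id_min),
-- as the obvious structural recursion over the remaining row elements with index j
def pvScanA : List Int → Nat → (Int × List Nat × Int × List Nat) → (Int × List Nat × Int × List Nat)
  | [], _, s => s
  | v :: rest, j, (mx, idmax, mn, idmin) =>
    let s1 : Int × List Nat := if v > mx then (v, [j]) else if v = mx then (mx, idmax ++ [j]) else (mx, idmax)
    let s2 : Int × List Nat := if v < mn then (v, [j]) else if v = mn then (mn, idmin ++ [j]) else (mn, idmin)
    pvScanA rest (j+1) (s1.1, s1.2, s2.1, s2.2)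

-- one iteration of A's outer loop on row A[i] (an empty row raises IndexError in Python)
def pvRowA (row : List Int) : List Int :=
  match row with
  | [] => []
  | h :: t =>
    let s := pvScanA t 1 (h, [0], h, [0])
    let row1 := s.2.1.foldl (fun r k => r.set k s.2.2.1) row      -- A[i][id_max[j]] = min
    s.2.2.2.foldl (fun r k => r.set k s.1) row1                   -- A[i][id_min[j]] = max

def Transfoma_matriz_v2 (A : List (List Int)) : List (List Int) := A.map pvRowA

-- ===== PORT B =====
def pvRowB (row : List Int) : List Int :=
  match row with
  | [] => []
  | h :: t =>
    let mx := t.foldl (fun m v => if v > m then v else m) h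
    let mn := t.foldl (fun m v => if v < m then v else m) h
    row.map (fun v => if v = mx then mn else if v = mn then mx else v)

def Transfoma_matriz_v2_alt (A : List (List Int)) : List (List Int) := A.map pvRowB

-- ===== PRECONDITION & SPEC =====
-- Pre_ excludes matrices containing an empty row: there the Python A raises IndexError on A[i][0]
def Pre_Transfoma_matriz_v2 (A : List (List Int)) : Prop := ∀ row ∈ A, row ≠ []
instance (A : List (List Int)) : Decidable (Pre_Transfoma_matriz_v2 A) := by unfold Pre_Transfoma_matriz_v2; infer_instance
def pvWitness_Transfoma_matriz_v2 : List (List Int) := [[1, 3, 2, 3], [5, 5], [-2]]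

def Spec_Transfoma_matriz_v2 (A : List (List Int)) (out : List (List Int)) : Prop := out = Transfoma_matriz_v2_alt A
instance (A : List (List Int)) (out : List (List Int)) : Decidable (Spec_Transfoma_matriz_v2 A out) := by unfold Spec_Transfoma_matriz_v2; infer_instance

-- ===== CLAIM (what is proved, stated in full; the proofs are below) =====
def Claim_equal_Transfoma_matriz_v2 : Prop := ∀ (A : List (List Int)), Dom_Transfoma_matriz_v2 A → Pre_Transfoma_matriz_v2 A → Spec_Transfoma_matriz_v2 A (Transfoma_matriz_v2 A)

-- ===== LEMMAS AND PROOFS =====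

-- max-half and min-half of A's scan, taken separately
def pvFM : List Int → Nat → Int × List Nat → Int × List Nat
  | [], _, s => s
  | v :: rest, j, (mx, im) =>
    pvFM rest (j+1) (if v > mx then (v, [j]) else if v = mx then (mx, im ++ [j]) else (mx, im))

def pvFm : List Int → Nat → Int × List Nat → Int × List Nat
  | [], _, s => s
  | v :: rest, j, (mn, im) =>
    pvFm rest (j+1) (if v < mn then (v, [j]) else if v = mn then (mn, im ++ [j]) else (mn, im))

-- positions (starting at offset j) of the occurrences of x in l
def pvOcc : List Int → Nat → Int → List Nat
  | [], _, _ => []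
  | v :: rest, j, x => (if v = x then [j] else []) ++ pvOcc rest (j+1) x

theorem pvScanA_decomp (l : List Int) : ∀ (j : Nat) (mx mn : Int) (im imn : List Nat),
    pvScanA l j (mx, im, mn, imn) =
      ((pvFM l j (mx, im)).1, (pvFM l j (mx, im)).2, (pvFm l j (mn, imn)).1, (pvFm l j (mn, imn)).2) := by
  induction l with
  | nil => intro j mx mn im imn; simp [pvScanA, pvFM, pvFm]
  | cons v rest ih =>
    intro j mx mn im imn
    simp only [pvScanA, pvFM, pvFm]
    split_ifs <;> simp_all

theorem pvF_ge (l : List Int) : ∀ a : Int, a ≤ l.foldl (fun m v => if v > m then v else m) a := by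
  induction l with
  | nil => intro a; simp
  | cons v rest ih =>
    intro a; simp only [List.foldl]
    refine le_trans ?_ (ih _); split <;> omega

theorem pvG_le (l : List Int) : ∀ a : Int, l.foldl (fun m v => if v < m then v else m) a ≤ a := by
  induction l with
  | nil => intro a; simp
  | cons v rest ih =>
    intro a; simp only [List.foldl]
    refine le_trans (ih _) ?_; split <;> omega

theorem pvFM_spec (l : List Int) : ∀ (j : Nat) (mx : Int) (im : List Nat),
    pvFM l j (mx, im) =
      (l.foldl (fun m v => if v > m then v else m) mx,
       (if l.foldl (fun m v => if v > m then v else m) mx = mx then im else [])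
         ++ pvOcc l j (l.foldl (fun m v => if v > m then v else m) mx)) := by
  induction l with
  | nil => intro j mx im; simp [pvFM, pvOcc]
  | cons v rest ih =>
    intro j mx im
    simp only [pvFM, List.foldl, pvOcc]
    by_cases h1 : v > mx
    · simp only [if_pos h1]
      rw [ih]
      have hge := pvF_ge rest v
      have hne : ¬ rest.foldl (fun m v => if v > m then v else m) v = mx := by omega
      rw [if_neg hne]
      by_cases hv : rest.foldl (fun m v => if v > m then v else m) v = v
      · rw [if_pos hv, if_pos hv.symm]
        simp
      · rw [if_neg hv, if_neg (fun hh => hv hh.symm)]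
        simp
    · simp only [if_neg h1]
      by_cases h2 : v = mx
      · simp only [if_pos h2]
        rw [ih]
        subst h2
        by_cases hv : rest.foldl (fun m w => if w > m then w else m) v = v
        · rw [if_pos hv, if_pos hv, if_pos hv.symm]
          simp
        · rw [if_neg hv, if_neg hv, if_neg (fun hh => hv hh.symm)]
          simp
      · simp only [if_neg h2]
        rw [ih]
        have hge := pvF_ge rest mx
        have hvlt : v < mx := by omega
        rw [if_neg (by omega : ¬ v = rest.foldl (fun m v => if v > m then v else m) mx)]
        simp
theorem pvFm_spec (l : List Int) : ∀ (j : Nat) (mn : Int) (im : List Nat),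
    pvFm l j (mn, im) =
      (l.foldl (fun m v => if v < m then v else m) mn,
       (if l.foldl (fun m v => if v < m then v else m) mn = mn then im else [])
         ++ pvOcc l j (l.foldl (fun m v => if v < m then v else m) mn)) := by
  induction l with
  | nil => intro j mn im; simp [pvFm, pvOcc]
  | cons v rest ih =>
    intro j mn im
    simp only [pvFm, List.foldl, pvOcc]
    by_cases h1 : v < mn
    · simp only [if_pos h1]
      rw [ih]
      have hle := pvG_le rest v
      have hne : ¬ rest.foldl (fun m v => if v < m then v else m) v = mn := by omega
      rw [if_neg hne]
      by_cases hv : rest.foldl (fun m v => if v < m then v else m) v = v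
      · rw [if_pos hv, if_pos hv.symm]
        simp
      · rw [if_neg hv, if_neg (fun hh => hv hh.symm)]
        simp
    · simp only [if_neg h1]
      by_cases h2 : v = mn
      · simp only [if_pos h2]
        rw [ih]
        subst h2
        by_cases hv : rest.foldl (fun m w => if w < m then w else m) v = v
        · rw [if_pos hv, if_pos hv, if_pos hv.symm]
          simp
        · rw [if_neg hv, if_neg hv, if_neg (fun hh => hv hh.symm)]
          simp
      · simp only [if_neg h2]
        rw [ih]
        have hle := pvG_le rest mn
        have hvgt : mn < v := by omega
        rw [if_neg (by omega : ¬ v = rest.foldl (fun m v => if v < m then v else m) mn)]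
        simp
theorem pvOcc_mem (l : List Int) : ∀ (j k : Nat) (x : Int),
    k ∈ pvOcc l j x ↔ (j ≤ k ∧ l[k - j]? = some x) := by
  induction l with
  | nil => intro j k x; simp [pvOcc]
  | cons v rest ih =>
    intro j k x
    simp only [pvOcc, List.mem_append, ih]
    constructor
    · rintro (h | ⟨hjk, hg⟩)
      · split_ifs at h with hv
        · simp at h; subst h; subst hv; simp
        · simp at h
      · refine ⟨by omega, ?_⟩
        have : k - j = (k - (j+1)) + 1 := by omega
        rw [this]; simpa using hg
    · rintro ⟨hjk, hg⟩
      by_cases hk : k = j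
      · subst hk
        simp at hg
        left; simp [hg]
      · right
        refine ⟨by omega, ?_⟩
        have : k - j = (k - (j+1)) + 1 := by omega
        rw [this] at hg; simpa using hg

theorem pvFoldlSet_length (v : Int) (idx : List Nat) : ∀ (r : List Int),
    (idx.foldl (fun a i => a.set i v) r).length = r.length := by
  induction idx with
  | nil => intro r; simp
  | cons i rest ih => intro r; simp [List.foldl, ih]

theorem pvFoldlSet_getElem? (v : Int) (idx : List Nat) : ∀ (r : List Int) (k : Nat),
    (idx.foldl (fun a i => a.set i v) r)[k]? =
      if k ∈ idx ∧ k < r.length then some v else r[k]? := by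
  induction idx with
  | nil => intro r k; simp
  | cons i rest ih =>
    intro r k
    simp only [List.foldl, ih, List.length_set, List.mem_cons, List.getElem?_set]
    by_cases hk : k ∈ rest
    · by_cases hlt : k < r.length
      · simp [hk, hlt]
      · simp [hk, hlt]
        omega
    · by_cases hik : i = k
      · subst hik
        by_cases hlt : i < r.length <;> simp [hk, hlt]
      · simp [hk, hik]
        omega
theorem pvRow_eq (row : List Int) : pvRowA row = pvRowB row := by
  cases row with
  | nil => rfl
  | cons h t =>
    simp only [pvRowA, pvRowB, pvScanA_decomp, pvFM_spec, pvFm_spec]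
    set M := t.foldl (fun m v => if v > m then v else m) h with hM
    set m := t.foldl (fun m v => if v < m then v else m) h with hm
    set r : List Int := h :: t with hr
    have hoccM : (if M = h then [0] else []) ++ pvOcc t 1 M = pvOcc r 0 M := by
      simp only [hr, pvOcc]
      congr 1
      by_cases hMh : M = h
      · simp [hMh]
      · rw [if_neg hMh, if_neg (fun hh => hMh hh.symm)]
    have hoccm : (if m = h then [0] else []) ++ pvOcc t 1 m = pvOcc r 0 m := by
      simp only [hr, pvOcc]
      congr 1
      by_cases hmh : m = h
      · simp [hmh]
      · rw [if_neg hmh, if_neg (fun hh => hmh hh.symm)]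
    simp only [hoccM, hoccm]
    apply List.ext_getElem?
    intro k
    rw [pvFoldlSet_getElem?, pvFoldlSet_length, pvFoldlSet_getElem?, List.getElem?_map]
    have hmemM : k ∈ pvOcc r 0 M ↔ r[k]? = some M := by rw [pvOcc_mem]; simp
    have hmemm : k ∈ pvOcc r 0 m ↔ r[k]? = some m := by rw [pvOcc_mem]; simp
    rcases hrk : r[k]? with _ | x
    · have hklen : ¬ k < r.length := by
        simpa [List.getElem?_eq_none_iff] using hrk
      simp [hmemM, hmemm, hklen]
    · have hklen : k < r.length := by
        have := List.getElem?_eq_some_iff.mp hrk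
        exact this.1
      simp only [hmemM, hmemm, hrk, hklen, and_true, Option.map_some]
      by_cases hxm : x = m
      · by_cases hxM : x = M
        · have : M = m := by rw [← hxM, hxm]
          simp [hxm, this]
        · simp [hxm]
          intro hh
          exact hh.symm
      · by_cases hxM : x = M
        · simp [hxM]
        · simp [hxm, hxM]

-- ===== VERDICT (by name: the statement is the Claim_ definition above) =====
theorem Transfoma_matriz_v2_spec : Claim_equal_Transfoma_matriz_v2 := by
  intro A _ _
  unfold Spec_Transfoma_matriz_v2 Transfoma_matriz_v2 Transfoma_matriz_v2_alt
  exact List.map_congr_left (fun row _ => pvRow_eq row)
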